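-- pv_equiv track=rewrite | github.com/timqi/WenZi | src/wenzi/scripting/sources/snippet_source.py | _split_random_sections
-- ===== SOURCE A (Python) =====
-- from typing import Dict, List, Optional, Tuple
--
-- def _split_random_sections(body: str) -> List[str]:
--     """Split *body* into variant sections separated by ``===`` lines.
--
--     A separator is a line whose stripped content is exactly ``===`` (three
--     equals signs).  ``====`` or longer are NOT separators.
--
--     ``\\===`` on its own line is an escape — it produces a literal ``===``
--     in the output and is not treated as a separator.
--
--     Returns a list of section strings with leading/trailing whitespace
--     stripped per section.
--     """
--     lines = body.split("\n")
--     sections: List[str] = []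
--     current: List[str] = []
--
--     for line in lines:
--         stripped = line.strip()
--         if stripped == "===":
--             sections.append("\n".join(current))
--             current = []
--         elif stripped == "\\===":
--             current.append(line.replace("\\===", "===", 1))
--         else:
--             current.append(line)
--
--     sections.append("\n".join(current))
--
--     # Strip each section and drop empty leading/trailing sections that
--     # result from separators at the very start or end of the body.
--     result = [s.strip() for s in sections]
--     return [s for s in result if s]
-- ===== SOURCE B (Python) =====
-- def _split_random_sections(body):
--     """Divide-at-separator decomposition: repeatedly locate the next '==='
--     line and slice the chunk before it off the remaining lines; the \\===
--     escape is applied lazily when joining each chunk."""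
--     def esc(line):
--         return line.replace("\\===", "===", 1) if line.strip() == "\\===" else line
--
--     rest = body.split("\n")
--     chunks = []
--     while True:
--         k = next((i for i, l in enumerate(rest) if l.strip() == "==="), None)
--         if k is None:
--             chunks.append(rest)
--             break
--         chunks.append(rest[:k])
--         rest = rest[k + 1:]
--     secs = ("\n".join(esc(l) for l in c).strip() for c in chunks)
--     return [s for s in secs if s]
-- ===== Notes on version B (the rewrite author's own statement) =====
-- stated objective: alternative
-- what changed: Replaces A's line-by-line state machine (a fold carrying sections+current accumulators with escaping done during accumulation) by a divide-at-delimiter scheme: repeatedly find the index of the next separator line and slice the chunk before it off, then escape/join/strip/filter each chunk in a final stage.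
import Mathlib
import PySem

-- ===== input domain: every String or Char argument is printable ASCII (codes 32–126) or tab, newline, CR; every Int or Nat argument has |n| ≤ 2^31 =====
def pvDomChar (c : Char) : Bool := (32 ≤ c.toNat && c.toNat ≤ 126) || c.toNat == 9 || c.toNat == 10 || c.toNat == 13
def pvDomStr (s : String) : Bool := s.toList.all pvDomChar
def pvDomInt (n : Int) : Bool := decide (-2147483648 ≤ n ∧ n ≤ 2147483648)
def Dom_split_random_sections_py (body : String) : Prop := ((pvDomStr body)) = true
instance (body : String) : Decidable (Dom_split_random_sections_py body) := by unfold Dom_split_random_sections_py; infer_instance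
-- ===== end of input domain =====

-- B replaces A's single-pass state machine by a divide-at-delimiter decomposition
-- (find next separator index, slice the chunk off, recurse; escape/join/strip at the end); same objective, alternative structure.

-- ===== PORT A =====
-- line.replace(old, new, 1): replace the leftmost occurrence of old (old nonempty here); exact hand port
def pvReplaceOnce : List Char → List Char → List Char → List Char
  | [], _, _ => []
  | c :: cs, old, new =>
      if old.isPrefixOf (c :: cs) then new ++ (c :: cs).drop old.length
      else c :: pvReplaceOnce cs old new

-- A's loop body: state is (sections, current); stripped = line.strip(), branch per Python
def pvStepA (st : List (List Char) × List (List Char)) (line : List Char) :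
    List (List Char) × List (List Char) :=
  if PySem.Chars.strip line = "===".toList then (st.1 ++ [PySem.Chars.join ['\n'] st.2], [])
  else if PySem.Chars.strip line = "\\===".toList then
    (st.1, st.2 ++ [pvReplaceOnce line "\\===".toList "===".toList])
  else (st.1, st.2 ++ [line])

def split_random_sections_py (body : String) : List String :=
  let lines := (PySem.Chars.split? body.toList ['\n']).getD []
  let st := lines.foldl pvStepA ([], [])
  let sections := st.1 ++ [PySem.Chars.join ['\n'] st.2]
  let result := sections.map PySem.Chars.strip
  (result.filter (fun s => s ≠ [])).map String.mk

-- ===== PORT B =====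
def pvEsc (line : List Char) : List Char :=
  if PySem.Chars.strip line = "\\===".toList then
    pvReplaceOnce line "\\===".toList "===".toList
  else line

-- termination of pvChunks: a found index is within the list
theorem pvFindIdx_lt_length {α : Type} (p : α → Bool) :
    ∀ (l : List α) (k : Nat), l.findIdx? p = some k → k < l.length := by
  intro l
  induction l with
  | nil => intro k h; rw [List.findIdx?_nil] at h; simp at h
  | cons a as ih =>
    intro k h
    rw [List.findIdx?_cons] at h
    by_cases hp : p a = true
    · rw [if_pos hp] at h
      cases h
      simp
    · rw [if_neg hp] at h
      simp only [Option.map_eq_some_iff] at h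
      obtain ⟨j, hj, rfl⟩ := h
      have := ih j hj
      simp
      omega

-- B's while loop: find the index of the next separator line, slice the chunk before it off
def pvChunks (lines : List (List Char)) : List (List (List Char)) :=
  match h : lines.findIdx? (fun l => PySem.Chars.strip l = "===".toList) with
  | none => [lines]
  | some k => lines.take k :: pvChunks (lines.drop (k + 1))
termination_by lines.length
decreasing_by
  have hk := pvFindIdx_lt_length _ _ _ h
  simp; omega

def split_random_sections_py_alt (body : String) : List String :=
  let lines := (PySem.Chars.split? body.toList ['\n']).getD []
  let chunks := pvChunks lines
  let secs := chunks.map (fun c => PySem.Chars.strip (PySem.Chars.join ['\n'] (c.map pvEsc)))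
  (secs.filter (fun s => s ≠ [])).map String.mk

-- ===== PRECONDITION & SPEC =====
def Spec_split_random_sections_py (body : String) (out : List String) : Prop := out = split_random_sections_py_alt body
instance (body : String) (out : List String) : Decidable (Spec_split_random_sections_py body out) := by unfold Spec_split_random_sections_py; infer_instance

-- ===== CLAIM (what is proved, stated in full; the proofs are below) =====
def Claim_equal_split_random_sections_py : Prop := ∀ (body : String), Dom_split_random_sections_py body → Spec_split_random_sections_py body (split_random_sections_py body)

-- ===== LEMMAS AND PROOFS =====

-- intermediate fold used only by the proof: chunks built back-to-front with escaping inline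
def pvStepB (chunks : List (List (List Char))) (line : List Char) :
    List (List (List Char)) :=
  if PySem.Chars.strip line = "===".toList then [] :: chunks
  else
    match chunks with
    | h :: t => (pvEsc line :: h) :: t
    | [] => [[pvEsc line]]

def pvGoB (lines : List (List Char)) : List (List (List Char)) :=
  lines.foldr (fun line acc => pvStepB acc line) [[]]

theorem pvStepA_sep {l : List Char} (h : PySem.Chars.strip l = "===".toList)
    (s c : List (List Char)) :
    pvStepA (s, c) l = (s ++ [PySem.Chars.join ['\n'] c], []) := by
  simp [pvStepA, h]

theorem pvStepA_other {l : List Char} (h : ¬ PySem.Chars.strip l = "===".toList)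
    (s c : List (List Char)) :
    pvStepA (s, c) l = (s, c ++ [pvEsc l]) := by
  simp only [pvStepA, if_neg h, pvEsc]
  split_ifs <;> rfl

theorem pvStepB_sep {l : List Char} (h : PySem.Chars.strip l = "===".toList)
    (chunks : List (List (List Char))) :
    pvStepB chunks l = [] :: chunks := by
  simp [pvStepB, h]

theorem pvStepB_other {l : List Char} (h : ¬ PySem.Chars.strip l = "===".toList)
    (a : List (List Char)) (t : List (List (List Char))) :
    pvStepB (a :: t) l = (pvEsc l :: a) :: t := by
  simp only [pvStepB, if_neg h]

theorem pvGoB_cons (l : List Char) (ls : List (List Char)) :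
    pvGoB (l :: ls) = pvStepB (pvGoB ls) l := rfl

theorem pvGoB_ne_nil (lines : List (List Char)) : pvGoB lines ≠ [] := by
  induction lines with
  | nil => simp [pvGoB]
  | cons l ls ih =>
    rw [pvGoB_cons]
    by_cases hs : PySem.Chars.strip l = "===".toList
    · simp [pvStepB, hs]
    · cases hg : pvGoB ls with
      | nil => exact absurd hg ih
      | cons a t => rw [pvStepB_other hs]; simp

theorem pvChunks_eq_none {lines : List (List Char)}
    (h : lines.findIdx? (fun l => PySem.Chars.strip l = "===".toList) = none) :
    pvChunks lines = [lines] := by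
  rw [pvChunks, h]

theorem pvChunks_eq_some {lines : List (List Char)} {k : Nat}
    (h : lines.findIdx? (fun l => PySem.Chars.strip l = "===".toList) = some k) :
    pvChunks lines = lines.take k :: pvChunks (lines.drop (k + 1)) := by
  rw [pvChunks, h]

theorem pvChunks_ne_nil (lines : List (List Char)) : pvChunks lines ≠ [] := by
  cases h : lines.findIdx? (fun l => PySem.Chars.strip l = "===".toList) with
  | none => rw [pvChunks_eq_none h]; simp
  | some k => rw [pvChunks_eq_some h]; simp

theorem pvChunks_nil : pvChunks [] = [[]] := by
  rw [pvChunks_eq_none]; rfl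

theorem pvChunks_cons_sep {l : List Char} (h : PySem.Chars.strip l = "===".toList)
    (ls : List (List Char)) :
    pvChunks (l :: ls) = [] :: pvChunks ls := by
  have hf : (l :: ls).findIdx? (fun l => PySem.Chars.strip l = "===".toList) = some 0 := by
    rw [List.findIdx?_cons, if_pos (by simpa using h)]
  rw [pvChunks_eq_some hf]; simp

theorem pvChunks_cons_other {l : List Char} (h : ¬ PySem.Chars.strip l = "===".toList)
    (ls : List (List Char)) :
    pvChunks (l :: ls) =
      match pvChunks ls with
      | hd :: t => (l :: hd) :: t
      | [] => [[l]] := by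
  cases hf : ls.findIdx? (fun l => PySem.Chars.strip l = "===".toList) with
  | none =>
    have hf' : (l :: ls).findIdx? (fun l => PySem.Chars.strip l = "===".toList) = none := by
      rw [List.findIdx?_cons, if_neg (by simpa using h), hf]; rfl
    rw [pvChunks_eq_none hf', pvChunks_eq_none hf]
  | some k =>
    have hf' : (l :: ls).findIdx? (fun l => PySem.Chars.strip l = "===".toList) = some (k + 1) := by
      rw [List.findIdx?_cons, if_neg (by simpa using h), hf]; rfl
    rw [pvChunks_eq_some hf', pvChunks_eq_some hf]
    simp

-- B's chunk division computes the proof fold's chunks (with escaping pushed inside)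
theorem pvChunks_eq_goB (lines : List (List Char)) :
    (pvChunks lines).map (List.map pvEsc) = pvGoB lines := by
  induction lines with
  | nil => simp [pvChunks_nil, pvGoB]
  | cons l ls ih =>
    by_cases hs : PySem.Chars.strip l = "===".toList
    · rw [pvChunks_cons_sep hs, pvGoB_cons, pvStepB_sep hs, List.map_cons, ih]
      simp
    · rw [pvChunks_cons_other hs, pvGoB_cons, ← ih]
      cases hg : pvChunks ls with
      | nil => exact absurd hg (pvChunks_ne_nil ls)
      | cons a t => simp [pvStepB_other hs]

-- prepend the pending "current" lines onto the head chunk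
def pvConsHead (cur : List (List Char)) : List (List (List Char)) → List (List (List Char))
  | [] => [cur]
  | h :: t => (cur ++ h) :: t

theorem pvMain (lines : List (List Char)) :
    ∀ (secs cur : List (List Char)),
      (lines.foldl pvStepA (secs, cur)).1 ++
        [PySem.Chars.join ['\n'] (lines.foldl pvStepA (secs, cur)).2] =
      secs ++ (pvConsHead cur (pvGoB lines)).map (fun c => PySem.Chars.join ['\n'] c) := by
  induction lines with
  | nil =>
    intro secs cur
    simp [pvGoB, pvConsHead]
  | cons l ls ih =>
    intro secs cur
    rw [List.foldl_cons, pvGoB_cons]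
    by_cases hs : PySem.Chars.strip l = "===".toList
    · rw [pvStepA_sep hs, pvStepB_sep hs, ih]
      cases hg : pvGoB ls with
      | nil => exact absurd hg (pvGoB_ne_nil ls)
      | cons a t => simp [pvConsHead]
    · rw [pvStepA_other hs, ih]
      cases hg : pvGoB ls with
      | nil => exact absurd hg (pvGoB_ne_nil ls)
      | cons a t => rw [pvStepB_other hs]; simp [pvConsHead]

-- ===== VERDICT (by name: the statement is the Claim_ definition above) =====
theorem split_random_sections_py_spec : Claim_equal_split_random_sections_py := by
  intro body _
  unfold Spec_split_random_sections_py
  simp only [split_random_sections_py, split_random_sections_py_alt]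
  rw [pvMain ((PySem.Chars.split? body.toList ['\n']).getD []) [] [],
      ← pvChunks_eq_goB]
  cases hg : pvChunks ((PySem.Chars.split? body.toList ['\n']).getD []) with
  | nil => exact absurd hg (pvChunks_ne_nil _)
  | cons a t => simp [pvConsHead, List.map_map, Function.comp_def]
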